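-- pv_equiv track=rewrite | github.com/datacamp/oil | core/glob_.py | _GlobUnescape
-- ===== SOURCE A (Python) =====
-- GLOB_META_CHARS = r'\*?[]-:!'
--
-- def _GlobUnescape(s):  # used by cmd_exec
--   """Remove glob escaping from a string.
--
--   Used when there is no glob match.
--   TODO: Can probably get rid of this, as long as you save the original word.
--
--   Complicated example: 'a*b'*.py, which will be escaped to a\*b*.py.  So in
--   word_eval _JoinElideEscape and EvalWordToString you have to build two
--   'parallel' strings -- one escaped and one not.
--   """
--   unescaped = ''
--   i = 0
--   n = len(s)
--   while i < n:
--     c = s[i]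
--     if c == '\\':
--       assert i != n - 1, 'There should be no trailing single backslash!'
--       i += 1
--       c2 = s[i]
--       if c2 in GLOB_META_CHARS:
--         unescaped += c2
--       else:
--         raise AssertionError("Unexpected escaped character %r" % c2)
--     else:
--       unescaped += c
--     i += 1
--   return unescaped
-- ===== SOURCE B (Python) =====
-- import re
--
-- GLOB_META_CHARS = r'\*?[]-:!'
--
-- def _GlobUnescape(s):
--   # One left-to-right regex pass: drop the backslash of every escape pair.
--   return re.sub(r'(?s)\\(.)', r'\1', s)
-- ===== Notes on version B (the rewrite author's own statement) =====
-- stated objective: idiomatic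
-- what changed: Replaces the hand-written index loop with string concatenation by a single non-overlapping left-to-right regex substitution that drops the backslash of each escape pair.
import Mathlib
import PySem

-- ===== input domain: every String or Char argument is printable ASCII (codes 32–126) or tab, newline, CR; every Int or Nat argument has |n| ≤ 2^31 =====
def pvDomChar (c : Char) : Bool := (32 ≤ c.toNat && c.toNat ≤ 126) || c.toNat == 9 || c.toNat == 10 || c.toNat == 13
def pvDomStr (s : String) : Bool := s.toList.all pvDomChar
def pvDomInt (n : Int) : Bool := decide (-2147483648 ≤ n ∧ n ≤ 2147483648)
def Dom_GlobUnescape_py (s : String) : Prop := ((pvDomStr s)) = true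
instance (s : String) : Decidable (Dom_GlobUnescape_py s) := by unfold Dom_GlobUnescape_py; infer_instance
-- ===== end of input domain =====

-- B replaces A's index-and-accumulator while loop by a single left-to-right regex
-- substitution over escape pairs (idiomatic).

-- ===== PORT A =====
-- GLOB_META_CHARS = r'\*?[]-:!'
def globMetaChars : List Char := ['\\', '*', '?', '[', ']', '-', ':', '!']

-- A's while loop: index i, accumulator `unescaped`; fuel bounds the iterations.
-- Where the Python raises AssertionError (trailing backslash, or an escaped char
-- outside GLOB_META_CHARS) the port stops with the accumulator; those inputs are
-- excluded by Pre_ below.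
def aLoop (cs : List Char) (n : Nat) : Nat → Nat → List Char → List Char
  | 0, _, acc => acc
  | fuel + 1, i, acc =>
    if i < n then
      if cs.getD i ' ' = '\\' then
        if i = n - 1 then acc                                     -- assert fails in Python
        else if globMetaChars.contains (cs.getD (i + 1) ' ') then
          aLoop cs n fuel (i + 2) (acc ++ [cs.getD (i + 1) ' ']) -- unescaped += c2; i += 2
        else acc                                                  -- raise AssertionError in Python
      else aLoop cs n fuel (i + 1) (acc ++ [cs.getD i ' '])       -- unescaped += c
    else acc

def GlobUnescape_py (s : String) : String :=
  String.ofList (aLoop s.toList s.toList.length s.toList.length 0 [])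

-- ===== PORT B =====
-- B's regex substitution: scan left to right; each '\' consumes the next
-- character and the pair is replaced by that character; an unmatched trailing '\'
-- is left in place.
def altGo : List Char → List Char
  | [] => []
  | c :: rest =>
    if c = '\\' then
      match rest with
      | [] => ['\\']
      | c2 :: rest2 => c2 :: altGo rest2
    else c :: altGo rest

def GlobUnescape_py_alt (s : String) : String := String.ofList (altGo s.toList)

-- ===== PRECONDITION & SPEC =====
-- bsRun cs i = length of the maximal run of backslashes immediately before position i
def bsRun (cs : List Char) (i : Nat) : Nat :=
  ((cs.take i).reverse.takeWhile (fun c => c == '\\')).length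

-- Pre_ excludes exactly the inputs on which A raises AssertionError: a backslash that
-- starts an escape (an even run of backslashes precedes it) must be followed by a
-- GLOB_META_CHARS character — in particular it must not be the last character.
def Pre_GlobUnescape_py (s : String) : Prop :=
  ∀ i, i < s.toList.length → s.toList.getD i ' ' = '\\' → bsRun s.toList i % 2 = 0 →
    i + 1 < s.toList.length ∧ s.toList.getD (i + 1) ' ' ∈ globMetaChars
instance (s : String) : Decidable (Pre_GlobUnescape_py s) := by
  unfold Pre_GlobUnescape_py; infer_instance

def pvWitness_GlobUnescape_py : String := "a\\*b"

def Spec_GlobUnescape_py (s : String) (out : String) : Prop := out = GlobUnescape_py_alt s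
instance (s : String) (out : String) : Decidable (Spec_GlobUnescape_py s out) := by
  unfold Spec_GlobUnescape_py; infer_instance

-- ===== CLAIM (what is proved, stated in full; the proofs are below) =====
def Claim_equal_GlobUnescape_py : Prop := ∀ (s : String), Dom_GlobUnescape_py s → Pre_GlobUnescape_py s → Spec_GlobUnescape_py s (GlobUnescape_py s)

-- ===== LEMMAS AND PROOFS =====

-- Boolean transcription of Pre_ along A's pairing, used only by the proofs below.
def preOk : List Char → Bool
  | [] => true
  | c :: rest =>
    if c = '\\' then
      match rest with
      | [] => false
      | c2 :: rest2 => globMetaChars.contains c2 && preOk rest2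
    else preOk rest

lemma altGo_bb (c2 : Char) (r : List Char) : altGo ('\\' :: c2 :: r) = c2 :: altGo r := rfl

lemma altGo_ne (c : Char) (r : List Char) (h : c ≠ '\\') : altGo (c :: r) = c :: altGo r := by
  rw [altGo.eq_def]
  simp [h]

lemma preOk_b1 : preOk ['\\'] = false := rfl

lemma preOk_bb (c2 : Char) (r : List Char) :
    preOk ('\\' :: c2 :: r) = (globMetaChars.contains c2 && preOk r) := by
  simp [preOk]

lemma preOk_ne (c : Char) (r : List Char) (h : c ≠ '\\') : preOk (c :: r) = preOk r := by
  rw [preOk.eq_def]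
  simp [h]

lemma tw_len (p : Char → Bool) (l₁ l₂ : List Char) :
    (List.takeWhile p (l₁ ++ l₂)).length =
      (List.takeWhile p l₁).length +
        (if (List.takeWhile p l₁).length = l₁.length then (List.takeWhile p l₂).length else 0) := by
  induction l₁ with
  | nil => simp
  | cons a l ih =>
    by_cases h : p a
    · simp only [List.cons_append, List.takeWhile_cons, h, if_true, List.length_cons, ih]
      split_ifs <;> omega
    · simp [List.takeWhile_cons, h]

lemma bsRun_zero (cs : List Char) : bsRun cs 0 = 0 := by simp [bsRun]

lemma bsRun_cons_ne (c : Char) (rest : List Char) (i : Nat) (h : c ≠ '\\') :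
    bsRun (c :: rest) (i + 1) = bsRun rest i := by
  simp only [bsRun, List.take_succ_cons, List.reverse_cons, tw_len]
  have h0 : (List.takeWhile (fun x => x == '\\') [c]).length = 0 := by
    simp [List.takeWhile_cons, h]
  rw [h0]
  simp

lemma bsRun_one_bs (l : List Char) : bsRun ('\\' :: l) 1 = 1 := by
  simp [bsRun, List.take_succ_cons, List.takeWhile_cons]

lemma bsRun_cons2 (c2 : Char) (rest2 : List Char) (i : Nat) :
    bsRun ('\\' :: c2 :: rest2) (i + 2) % 2 = bsRun rest2 i % 2 := by
  have h2 : List.take (i + 2) ('\\' :: c2 :: rest2) = '\\' :: c2 :: List.take i rest2 := by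
    simp [List.take_succ_cons]
  simp only [bsRun, h2, List.reverse_cons, List.append_assoc, List.cons_append,
    List.nil_append]
  rw [tw_len]
  by_cases h : c2 = '\\'
  · subst h
    have h0 : (List.takeWhile (fun x => x == '\\') ['\\', '\\']).length = 2 := by decide
    rw [h0]
    split_ifs <;> omega
  · have h0 : (List.takeWhile (fun x => x == '\\') [c2, '\\']).length = 0 := by
      simp [List.takeWhile_cons, h]
    rw [h0]
    split_ifs <;> omega

lemma pre_iff (n : Nat) : ∀ cs : List Char, cs.length ≤ n →
    ((∀ i, i < cs.length → cs.getD i ' ' = '\\' → bsRun cs i % 2 = 0 →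
        i + 1 < cs.length ∧ cs.getD (i + 1) ' ' ∈ globMetaChars) ↔ preOk cs = true) := by
  induction n with
  | zero =>
    intro cs hlen
    rcases cs with _ | ⟨c, rest⟩
    · constructor
      · intro _; rfl
      · intro _ i hi _ _; simp at hi
    · simp at hlen
  | succ n ih =>
    intro cs hlen
    rcases cs with _ | ⟨c, rest⟩
    · constructor
      · intro _; rfl
      · intro _ i hi _ _; simp at hi
    · by_cases hc : c = '\\'
      · subst hc
        rcases rest with _ | ⟨c2, rest2⟩
        · constructor
          · intro h
            have h0 := h 0 (by simp) (by simp) (by simp [bsRun_zero])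
            simp at h0
          · intro h
            rw [preOk_b1] at h
            simp at h
        · have hsplit : preOk ('\\' :: c2 :: rest2) = true ↔
              (c2 ∈ globMetaChars ∧ preOk rest2 = true) := by
            rw [preOk_bb, Bool.and_eq_true]
            simp
          rw [hsplit, ← ih rest2 (by simp at hlen; omega)]
          constructor
          · intro h
            refine ⟨?_, ?_⟩
            · have h0 := h 0 (by simp) (by simp) (by simp [bsRun_zero])
              simpa using h0.2
            · intro i hi hbs hpar
              have h2' := h (i + 2) (by simp only [List.length_cons]; omega)
                (by simpa using hbs) (by rw [bsRun_cons2]; exact hpar)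
              refine ⟨by simp only [List.length_cons] at h2' ⊢; omega, ?_⟩
              simpa using h2'.2
          · rintro ⟨hc2, hP⟩ i hi hbs hpar
            rcases i with _ | (_ | i)
            · exact ⟨by simp only [List.length_cons]; omega, by simpa using hc2⟩
            · exfalso
              rw [bsRun_one_bs] at hpar
              omega
            · have hx := hP i (by simp only [List.length_cons] at hi; omega)
                (by simpa using hbs) (by rw [bsRun_cons2] at hpar; exact hpar)
              refine ⟨by simp only [List.length_cons] at hx ⊢; omega, ?_⟩
              simpa using hx.2
      · rw [preOk_ne _ _ hc, ← ih rest (by simp at hlen; omega)]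
        constructor
        · intro h i hi hbs hpar
          have hx := h (i + 1) (by simp only [List.length_cons]; omega)
            (by simpa using hbs) (by rw [bsRun_cons_ne _ _ _ hc]; exact hpar)
          refine ⟨by simp only [List.length_cons] at hx ⊢; omega, ?_⟩
          simpa using hx.2
        · intro h i hi hbs hpar
          rcases i with _ | i
          · exfalso
            simp only [List.getD_cons_zero] at hbs
            exact hc hbs
          · have hx := h i (by simp only [List.length_cons] at hi; omega)
              (by simpa using hbs) (by rw [bsRun_cons_ne _ _ _ hc] at hpar; exact hpar)
            refine ⟨by simp only [List.length_cons] at hx ⊢; omega, ?_⟩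
            simpa using hx.2

lemma aLoop_eq_altGo (cs : List Char) (fuel i : Nat) (acc : List Char)
    (hle : i ≤ cs.length) (hfuel : cs.length - i ≤ fuel)
    (hpre : preOk (List.drop i cs) = true) :
    aLoop cs cs.length fuel i acc = acc ++ altGo (List.drop i cs) := by
  induction fuel generalizing i acc with
  | zero =>
    have hi : i = cs.length := by omega
    subst hi
    simp [aLoop, List.drop_length, altGo]
  | succ fuel ih =>
    by_cases hi : i < cs.length
    · have hdrop : List.drop i cs = cs[i] :: List.drop (i + 1) cs :=
        (List.getElem_cons_drop hi).symm
      have hgetD : cs.getD i ' ' = cs[i] := by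
        simp [List.getD, List.getElem?_eq_getElem hi]
      by_cases hc : cs[i] = '\\'
      · rcases h1 : List.drop (i + 1) cs with _ | ⟨c2, rest2⟩
        · exfalso
          rw [hdrop, hc, h1, preOk_b1] at hpre
          exact Bool.false_ne_true hpre
        · have hlen : cs.length - (i + 1) = rest2.length + 1 := by
            have := congrArg List.length h1
            simpa [List.length_drop] using this
          have hi1 : i + 1 < cs.length := by omega
          have hcons : cs[i + 1] :: List.drop (i + 1 + 1) cs = c2 :: rest2 := by
            rw [List.getElem_cons_drop hi1]; exact h1
          obtain ⟨hc2, hdrop2⟩ := List.cons.inj hcons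
          have hdrop2' : List.drop (i + 2) cs = rest2 := hdrop2
          have hpre' : (globMetaChars.contains c2 && preOk rest2) = true := by
            rw [hdrop, hc, h1, preOk_bb] at hpre; exact hpre
          rw [Bool.and_eq_true] at hpre'
          obtain ⟨hmetab, hpre2⟩ := hpre'
          have hne : i ≠ cs.length - 1 := by omega
          have hgetD2 : cs.getD (i + 1) ' ' = c2 := by
            simp [List.getD, List.getElem?_eq_getElem hi1, hc2]
          rw [hdrop, hc, h1, altGo_bb]
          simp only [aLoop]
          rw [if_pos hi, hgetD, if_pos hc, if_neg hne, hgetD2, if_pos hmetab]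
          rw [ih (i + 2) (acc ++ [c2]) (by omega) (by omega) (by rw [hdrop2']; exact hpre2)]
          rw [hdrop2']
          simp
      · have hpre1 : preOk (List.drop (i + 1) cs) = true := by
          rw [hdrop, preOk_ne _ _ hc] at hpre; exact hpre
        rw [hdrop, altGo_ne _ _ hc]
        simp only [aLoop]
        rw [if_pos hi, hgetD, if_neg hc]
        rw [ih (i + 1) (acc ++ [cs[i]]) (by omega) (by omega) hpre1]
        simp
    · have hieq : i = cs.length := by omega
      subst hieq
      simp only [aLoop]
      rw [if_neg hi]
      simp [List.drop_length, altGo]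

-- ===== VERDICT (by name: the statement is the Claim_ definition above) =====
theorem GlobUnescape_py_spec : Claim_equal_GlobUnescape_py := by
  intro s _ hpre
  unfold Pre_GlobUnescape_py at hpre
  have hbool : preOk s.toList = true :=
    (pre_iff s.toList.length s.toList (le_refl _)).mp hpre
  unfold Spec_GlobUnescape_py GlobUnescape_py GlobUnescape_py_alt
  rw [aLoop_eq_altGo s.toList s.toList.length 0 [] (Nat.zero_le _) (by omega)
    (by simpa using hbool)]
  simp
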